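-- pv_equiv track=rewrite | github.com/mikhailmartin/Yandex-AlgorithmTraining7.0 | HomeWork1/H_task_allocation.py | solve
-- ===== SOURCE A (Python) =====
-- def solve(orders: list[str]) -> int:
--
--     even_items = []
--     odd_items = []
--     for order in orders:
--         even_s_count = order[::2].count("S")
--         odd_s_count = order[1::2].count("S")
--         if len(order) % 2 == 0:
--             even_items.append((even_s_count, odd_s_count))
--         else:
--             odd_items.append((even_s_count, odd_s_count))
--
--     result = 0
--     if not odd_items:
--         for even_s_count, odd_s_count in even_items:
--             result += even_s_count
--     else:
--         for even_s_count, odd_s_count in even_items: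
--             result += max(even_s_count, odd_s_count)
--
--         odd_items = sorted(odd_items, key=lambda x: x[1] - x[0])
--
--         left_pointer = 0
--         right_pointer = len(odd_items) - 1
--         step = 0
--         while left_pointer <= right_pointer:
--             if step == 0:
--                 result += odd_items[left_pointer][0]
--                 left_pointer += 1
--             else:
--                 result += odd_items[right_pointer][1]
--                 right_pointer -= 1
--             step = 1 - step
--
--     return result
-- ===== SOURCE B (Python) =====
-- def solve(orders: list[str]) -> int:
--     even_pairs = []
--     diffs = []          # odd_s_count - even_s_count for each odd-length order
--     odd_base = 0        # sum of even_s_count over odd-length orders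
--     for order in orders:
--         a = order[::2].count("S")
--         b = order[1::2].count("S")
--         if len(order) % 2 == 0:
--             even_pairs.append((a, b))
--         else:
--             odd_base += a
--             diffs.append(b - a)
--
--     if not diffs:
--         return sum(a for a, b in even_pairs)
--
--     diffs = sorted(diffs, reverse=True)
--     m = len(diffs) // 2
--     return (sum(max(a, b) for a, b in even_pairs)
--             + odd_base + sum(diffs[:m]))
-- ===== Notes on version B (the rewrite author's own statement) =====
-- stated objective: alternative
-- what changed: The alternating two-pointer walk over the sorted odd-length pairs is replaced by summing all even-position counts plus the largest floor(n/2) differences (odd-count minus even-count) taken as a prefix of the descending-sorted difference list.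
import Mathlib
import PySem

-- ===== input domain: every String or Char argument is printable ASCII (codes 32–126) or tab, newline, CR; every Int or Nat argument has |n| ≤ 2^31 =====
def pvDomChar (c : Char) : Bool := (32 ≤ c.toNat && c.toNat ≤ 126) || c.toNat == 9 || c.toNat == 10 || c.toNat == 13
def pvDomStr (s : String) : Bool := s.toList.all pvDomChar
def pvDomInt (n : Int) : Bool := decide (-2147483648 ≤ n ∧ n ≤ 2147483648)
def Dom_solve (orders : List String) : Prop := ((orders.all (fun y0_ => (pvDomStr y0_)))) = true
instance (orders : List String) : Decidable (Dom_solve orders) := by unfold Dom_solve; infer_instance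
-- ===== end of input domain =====

-- B replaces A's alternating two-pointer pass with a front/back-free formulation:
-- sum of all even-position counts plus the largest ⌊n/2⌋ differences. Same cost, different algorithm.

-- ===== PORT A =====

-- order[::2].count("S") / order[1::2].count("S")
def pvEvenS (order : String) : Int :=
  ((PySem.Str.count ((PySem.Str.slice? order none none 2).getD "") "S" : Nat) : Int)
def pvOddS (order : String) : Int :=
  ((PySem.Str.count ((PySem.Str.slice? order (some 1) none 2).getD "") "S" : Nat) : Int)

-- the while loop with left_pointer / right_pointer / step (indexing is always in range)
def twoPtr (ys : List (Int × Int)) (l r step acc : Int) : Int :=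
  if _h : l ≤ r then
    if step = 0 then
      twoPtr ys (l + 1) r (1 - step) (acc + (PySem.List.pyGetD ys l (0, 0)).1)
    else
      twoPtr ys l (r - 1) (1 - step) (acc + (PySem.List.pyGetD ys r (0, 0)).2)
  else acc
termination_by (r + 1 - l).toNat
decreasing_by all_goals omega

def solve (orders : List String) : Int :=
  let p := orders.foldl (fun (st : List (Int × Int) × List (Int × Int)) order =>
    let evenS := pvEvenS order
    let oddS := pvOddS order
    if PySem.Int.mod (PySem.Str.len order) 2 = 0 then (st.1 ++ [(evenS, oddS)], st.2)
    else (st.1, st.2 ++ [(evenS, oddS)])) ([], [])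
  let evenItems := p.1
  let oddItems := p.2
  if oddItems = [] then
    evenItems.foldl (fun result x => result + x.1) 0
  else
    let result := evenItems.foldl (fun result x => result + max x.1 x.2) 0
    let ys := PySem.List.sorted oddItems (fun x => x.2 - x.1) false
    twoPtr ys 0 ((ys.length : Int) - 1) 0 result

-- ===== PORT B =====

def solve_alt (orders : List String) : Int :=
  let st := orders.foldl (fun (st : List (Int × Int) × List Int × Int) order =>
    let a := pvEvenS order
    let b := pvOddS order
    if PySem.Int.mod (PySem.Str.len order) 2 = 0 then (st.1 ++ [(a, b)], st.2.1, st.2.2)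
    else (st.1, st.2.1 ++ [b - a], st.2.2 + a)) ([], [], 0)
  if st.2.1 = [] then
    (st.1.map (fun x => x.1)).sum
  else
    let ds := PySem.List.sorted st.2.1 (fun x => x) true
    (st.1.map (fun x => max x.1 x.2)).sum + st.2.2 + (ds.take (ds.length / 2)).sum

-- ===== PRECONDITION & SPEC =====
def Spec_solve (orders : List String) (out : Int) : Prop := out = solve_alt orders
instance (orders : List String) (out : Int) : Decidable (Spec_solve orders out) := by unfold Spec_solve; infer_instance

-- ===== CLAIM (what is proved, stated in full; the proofs are below) =====
def Claim_equal_solve : Prop := ∀ (orders : List String), Dom_solve orders → Spec_solve orders (solve orders)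

-- ===== LEMMAS AND PROOFS =====

theorem twoPtr_spec (ys : List (Int × Int)) : ∀ (c : Nat) (l r acc step : Int),
    0 ≤ l → r < (ys.length : Int) → (r + 1 - l).toNat = c → (step = 0 ∨ step = 1) →
    twoPtr ys l r step acc =
      acc + (((((ys.drop l.toNat).take c).take (if step = 0 then (c + 1) / 2 else c / 2)).map (fun x => x.1)).sum)
          + (((((ys.drop l.toNat).take c).drop (if step = 0 then (c + 1) / 2 else c / 2)).map (fun x => x.2)).sum) := by
  intro c
  induction c with
  | zero =>
    intro l r acc step hl hr hc _
    rw [twoPtr]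
    have : ¬ l ≤ r := by omega
    simp [this]
  | succ c ih =>
    intro l r acc step hl hr hc hstep
    have hlr : l ≤ r := by omega
    have hlen : l.toNat < ys.length := by omega
    have hdrop : ys.drop l.toNat = ys[l.toNat] :: ys.drop (l.toNat + 1) :=
      (List.getElem_cons_drop hlen).symm
    rcases hstep with h0 | h1
    · -- step = 0 : take the left element
      subst h0
      rw [twoPtr, dif_pos hlr, if_pos rfl]
      have hrec := ih (l + 1) r (acc + (PySem.List.pyGetD ys l (0, 0)).1) (1 - 0)
        (by omega) hr (by omega) (by right; norm_num)
      rw [hrec]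
      have hget : PySem.List.pyGetD ys l (0, 0) = ys[l.toNat] :=
        PySem.List.pyGetD_eq_getElem ys (0, 0) hl (by omega)
      have hln : (l + 1).toNat = l.toNat + 1 := by omega
      rw [hget, hln, hdrop]
      have h1ne : ¬ ((1 : Int) - 0 = 0) := by norm_num
      simp only [if_neg h1ne, if_true]
      rw [show (c + 1 + 1) / 2 = c / 2 + 1 by omega]
      simp only [List.take_succ_cons, List.drop_succ_cons, List.map_cons, List.sum_cons]
      ring
    · -- step = 1 : take the right element
      subst h1
      rw [twoPtr, dif_pos hlr, if_neg (by norm_num)]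
      have hrec := ih l (r - 1) (acc + (PySem.List.pyGetD ys r (0, 0)).2) (1 - 1)
        hl (by omega) (by omega) (by left; norm_num)
      rw [hrec]
      have hget : PySem.List.pyGetD ys r (0, 0) = ys[r.toNat] :=
        PySem.List.pyGetD_eq_getElem ys (0, 0) (by omega) hr
      rw [hget]
      have h1e : ((1 : Int) - 1 = 0) := by norm_num
      simp only [h1e, if_neg (by norm_num : ¬ (1 : Int) = 0)]
      -- seg of length c+1 = seg of length c ++ [ys[r]]
      have hidx : l.toNat + c < ys.length := by omega
      have hidx2 : l.toNat + c = r.toNat := by omega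
      have hseg : (ys.drop l.toNat).take (c + 1)
          = (ys.drop l.toNat).take c ++ [ys[r.toNat]] := by
        rw [List.take_add_one]
        congr 1
        rw [List.getElem?_drop]
        rw [List.getElem?_eq_getElem (by omega)]
        simp [hidx2]
      rw [hseg]
      have hlen2 : ((ys.drop l.toNat).take c).length = c := by
        rw [List.length_take, List.length_drop]; omega
      have hle : (c + 1) / 2 ≤ ((ys.drop l.toNat).take c).length := by omega
      rw [List.take_append_of_le_length hle, List.drop_append_of_le_length hle]
      simp
      ring

theorem loops_agree (orders : List String) :
    ∀ (E : List (Int × Int)) (O : List (Int × Int)),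
    orders.foldl (fun (st : List (Int × Int) × List Int × Int) order =>
      let a := pvEvenS order
      let b := pvOddS order
      if PySem.Int.mod (PySem.Str.len order) 2 = 0 then (st.1 ++ [(a, b)], st.2.1, st.2.2)
      else (st.1, st.2.1 ++ [b - a], st.2.2 + a)) (E, O.map (fun x => x.2 - x.1), (O.map (fun x => x.1)).sum)
    = (let p := orders.foldl (fun (st : List (Int × Int) × List (Int × Int)) order =>
        let evenS := pvEvenS order
        let oddS := pvOddS order
        if PySem.Int.mod (PySem.Str.len order) 2 = 0 then (st.1 ++ [(evenS, oddS)], st.2)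
        else (st.1, st.2 ++ [(evenS, oddS)])) (E, O)
       (p.1, p.2.map (fun x => x.2 - x.1), (p.2.map (fun x => x.1)).sum)) := by
  induction orders with
  | nil => intro E O; rfl
  | cons o rest ih =>
    intro E O
    simp only [List.foldl_cons]
    by_cases h : PySem.Int.mod (PySem.Str.len o) 2 = 0
    · simp only [h, if_true]
      exact ih (E ++ [(pvEvenS o, pvOddS o)]) O
    · simp only [if_neg h]
      have := ih E (O ++ [(pvEvenS o, pvOddS o)])
      simpa using this

theorem sum_map_sub (zs : List (Int × Int)) :
    (zs.map (fun x => x.2 - x.1)).sum = (zs.map (fun x => x.2)).sum - (zs.map (fun x => x.1)).sum := by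
  induction zs with
  | nil => simp
  | cons z t ih => simp only [List.map_cons, List.sum_cons, ih]; ring

-- sorted(diffs, reverse=True) is the reverse of the diffs read off the ascending-sorted pairs
theorem sorted_diffs_eq (O : List (Int × Int)) :
    PySem.List.sorted (O.map (fun x => x.2 - x.1)) (fun x => x) true
      = ((PySem.List.sorted O (fun x => x.2 - x.1) false).map (fun x => x.2 - x.1)).reverse := by
  apply List.Perm.eq_of_pairwise (fun a b _ _ h1 h2 => le_antisymm h2 h1)
  · exact PySem.List.sorted_pairwise_rev _ _
  · rw [List.pairwise_reverse]
    rw [List.pairwise_map]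
    exact PySem.List.sorted_pairwise O (fun x => x.2 - x.1)
  · refine ((PySem.List.sorted_perm _ _ _).trans ?_).trans (List.reverse_perm _).symm
    exact ((PySem.List.sorted_perm O _ false).map _).symm

-- ===== VERDICT (by name: the statement is the Claim_ definition above) =====
theorem solve_spec : Claim_equal_solve := by
  intro orders _
  unfold Spec_solve solve solve_alt
  have hL := loops_agree orders [] []
  simp only [List.map_nil, List.sum_nil] at hL
  rw [hL]
  set p := orders.foldl (fun (st : List (Int × Int) × List (Int × Int)) order =>
      let evenS := pvEvenS order
      let oddS := pvOddS order
      if PySem.Int.mod (PySem.Str.len order) 2 = 0 then (st.1 ++ [(evenS, oddS)], st.2)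
      else (st.1, st.2 ++ [(evenS, oddS)])) ([], []) with hp
  by_cases hO : p.2 = []
  · simp only [hO, List.map_nil, if_true, PySem.List.foldl_add, zero_add]
  · have hOm : p.2.map (fun x => x.2 - x.1) ≠ [] := by
      simp [List.map_eq_nil_iff, hO]
    simp only [if_neg hO, if_neg hOm]
    set ys := PySem.List.sorted p.2 (fun x => x.2 - x.1) false with hys
    have hperm : ys.Perm p.2 := PySem.List.sorted_perm _ _ _
    have hlen : 0 < ys.length := by
      rcases Nat.eq_zero_or_pos ys.length with h | h
      · exact absurd (by rw [← List.length_eq_zero_iff, ← hperm.length_eq, h]) hO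
      · exact h
    have hT := twoPtr_spec ys ys.length 0 ((ys.length : Int) - 1)
      (List.foldl (fun result x => result + max x.1 x.2) 0 p.1) 0
      le_rfl (by omega) (by omega) (Or.inl rfl)
    simp only [Int.toNat_zero, List.drop_zero, if_true, List.take_length] at hT
    rw [hT]
    -- B side
    rw [sorted_diffs_eq, ← hys]
    rw [List.length_reverse, List.length_map]
    rw [List.take_reverse, List.sum_reverse]
    rw [show (ys.map fun x => x.2 - x.1).length - ys.length / 2 = (ys.length + 1) / 2 by
      simp only [List.length_map]; omega]
    rw [← List.map_drop, sum_map_sub]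
    have hsplit : ((ys.map (fun x => x.1)).sum)
        = ((List.take ((ys.length + 1) / 2) ys).map (fun x => x.1)).sum
          + ((List.drop ((ys.length + 1) / 2) ys).map (fun x => x.1)).sum := by
      conv_lhs => rw [← List.take_append_drop ((ys.length + 1) / 2) ys]
      simp
    have hpsum : (p.2.map (fun x => x.1)).sum = (ys.map (fun x => x.1)).sum :=
      ((hperm.map _).sum_eq).symm
    rw [PySem.List.foldl_add, hpsum, hsplit]
    ring
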